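-- pv_equiv track=rewrite | github.com/hazard-venom/IRIS | iris_client.py | extract_wake_command
-- ===== SOURCE A (Python) =====
-- WAKE_WORD = "iris"
--
-- def extract_wake_command(text):
--     cleaned = text.strip().lower()
--     if not cleaned:
--         return None
--
--     if cleaned == WAKE_WORD:
--         return ""
--
--     prefixes = (
--         WAKE_WORD + " ",
--         "hey " + WAKE_WORD + " ",
--         "hi " + WAKE_WORD + " ",
--         "ok " + WAKE_WORD + " ",
--         "okay " + WAKE_WORD + " ",
--     )
--
--     for prefix in prefixes:
--         if cleaned.startswith(prefix):
--             return cleaned[len(prefix):].strip()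
--
--     return None
-- ===== SOURCE B (Python) =====
-- import re
--
-- # One compiled regex drives the parsing instead of a manual prefix loop.
-- # First alternative: the bare wake word.  Second: optional greeting, the wake
-- # word, a mandatory space, then the command (DOTALL so newlines are captured).
-- _WAKE_RE = re.compile(r"iris|(?:hey |hi |ok |okay )?iris (.*)", re.DOTALL)
--
--
-- def extract_wake_command(text):
--     cleaned = text.strip().lower()
--     if not cleaned:
--         return None
--     m = _WAKE_RE.fullmatch(cleaned)
--     if m is None:
--         return None
--     cmd = m.group(1)
--     return "" if cmd is None else cmd.strip()
-- ===== Notes on version B (the rewrite author's own statement) =====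
-- stated objective: idiomatic
-- what changed: The five-prefix startswith loop is replaced by a single compiled regex (bare wake word, or optional greeting plus wake word plus space plus DOTALL-captured command) whose one fullmatch call drives the parsing.
import Mathlib
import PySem

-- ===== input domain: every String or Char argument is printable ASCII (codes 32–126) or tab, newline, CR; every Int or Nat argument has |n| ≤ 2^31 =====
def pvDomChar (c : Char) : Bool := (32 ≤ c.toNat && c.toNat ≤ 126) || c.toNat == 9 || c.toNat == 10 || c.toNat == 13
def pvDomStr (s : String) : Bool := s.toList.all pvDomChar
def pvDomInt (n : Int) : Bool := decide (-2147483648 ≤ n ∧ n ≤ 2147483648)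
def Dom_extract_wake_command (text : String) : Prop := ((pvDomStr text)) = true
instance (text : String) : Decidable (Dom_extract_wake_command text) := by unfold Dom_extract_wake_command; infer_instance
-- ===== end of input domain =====

-- B replaces A's five-prefix startswith loop by a single compiled regex (one fullmatch call): idiomatic.

-- ===== PORT A =====
-- the 'for prefix in prefixes' loop: first matching prefix wins, remainder is stripped
def pvForPrefixes (cleaned : List Char) : List (List Char) → Option String
  | [] => none
  | p :: ps =>
      if PySem.Chars.startswith cleaned p then
        some (String.ofList (PySem.Chars.strip (PySem.List.slice cleaned (some (p.length : Int)) none)))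
      else pvForPrefixes cleaned ps

def extract_wake_command (text : String) : Option String :=
  let cleaned := PySem.Chars.lower (PySem.Chars.strip text.toList)
  if cleaned = [] then none
  else if cleaned = "iris".toList then some ""
  else pvForPrefixes cleaned
    ["iris ".toList, "hey iris ".toList, "hi iris ".toList, "ok iris ".toList, "okay iris ".toList]

-- ===== PORT B =====
-- Hand port (exact) of re.fullmatch with the fixed pattern r"iris|(?:hey |hi |ok |okay )?iris (.*)"
-- under re.DOTALL: alternatives are tried in the engine's order — the bare wake word first, then the
-- greeting alternatives of the optional group in pattern order, last the empty greeting — and the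
-- greedy DOTALL "(.*)" captures the whole remainder, so each trial is a pair of prefix tests.
def pvWakeFullmatch : List (List Char) → List Char → Option (List Char)
  | [], _ => none
  | g :: gs, cs =>
      if PySem.Chars.startswith cs g && PySem.Chars.startswith (cs.drop g.length) "iris ".toList then
        some ((cs.drop g.length).drop 5)
      else pvWakeFullmatch gs cs

def extract_wake_command_alt (text : String) : Option String :=
  let cleaned := PySem.Chars.lower (PySem.Chars.strip text.toList)
  if cleaned = [] then none
  else if cleaned = "iris".toList then some ""   -- first alternative matched: group(1) is None
  else
    match pvWakeFullmatch ["hey ".toList, "hi ".toList, "ok ".toList, "okay ".toList, []] cleaned with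
    | none => none
    | some cmd => some (String.ofList (PySem.Chars.strip cmd))

-- ===== PRECONDITION & SPEC =====
def Spec_extract_wake_command (text : String) (out : Option String) : Prop := out = extract_wake_command_alt text
instance (text : String) (out : Option String) : Decidable (Spec_extract_wake_command text out) := by unfold Spec_extract_wake_command; infer_instance

-- ===== CLAIM (what is proved, stated in full; the proofs are below) =====
def Claim_equal_extract_wake_command : Prop := ∀ (text : String), Dom_extract_wake_command text → Spec_extract_wake_command text (extract_wake_command text)

-- ===== LEMMAS AND PROOFS =====

-- startswith splits over an appended pattern: the two prefix tests B's matcher performs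
theorem pvSwAppend (a b : List Char) : ∀ cs, PySem.Chars.startswith cs (a ++ b)
    = (PySem.Chars.startswith cs a && PySem.Chars.startswith (cs.drop a.length) b) := by
  induction a with
  | nil => intro cs; simp [PySem.Chars.startswith]
  | cons x xs ih =>
      intro cs
      cases cs with
      | nil => simp [PySem.Chars.startswith, List.isPrefixOf]
      | cons c cs =>
          simp [PySem.Chars.startswith, List.isPrefixOf] at ih ⊢
          rw [ih, Bool.and_assoc]

-- A's prefix loop and B's regex matcher agree on every cleaned string
theorem pvKey (cs : List Char) :
    pvForPrefixes cs
      ["iris ".toList, "hey iris ".toList, "hi iris ".toList, "ok iris ".toList, "okay iris ".toList]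
  = (match pvWakeFullmatch ["hey ".toList, "hi ".toList, "ok ".toList, "okay ".toList, []] cs with
     | none => none
     | some cmd => some (String.ofList (PySem.Chars.strip cmd))) := by
  cases hI : PySem.Chars.startswith cs "iris ".toList with
  | true =>
      obtain ⟨t, ht⟩ := (PySem.Chars.startswith_iff cs "iris ".toList).mp hI
      subst ht
      simp [pvForPrefixes, pvWakeFullmatch, PySem.Chars.startswith, List.isPrefixOf,
        PySem.List.slice, PySem.List.clampIdx]
  | false =>
      simp only [pvForPrefixes, pvWakeFullmatch,
        show ("hey iris ".toList : List Char) = "hey ".toList ++ "iris ".toList from by decide,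
        show ("hi iris ".toList : List Char) = "hi ".toList ++ "iris ".toList from by decide,
        show ("ok iris ".toList : List Char) = "ok ".toList ++ "iris ".toList from by decide,
        show ("okay iris ".toList : List Char) = "okay ".toList ++ "iris ".toList from by decide,
        pvSwAppend, hI, List.drop_zero, List.length_nil, Bool.and_false, Bool.false_eq_true, if_false]
      split_ifs <;>
        first
          | rfl
          | (rw [PySem.List.slice_from_natCast]; simp [List.drop_drop])

-- ===== VERDICT (by name: the statement is the Claim_ definition above) =====
theorem extract_wake_command_spec : Claim_equal_extract_wake_command := by
  intro text _
  unfold Spec_extract_wake_command extract_wake_command extract_wake_command_alt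
  generalize PySem.Chars.lower (PySem.Chars.strip text.toList) = cleaned
  dsimp only
  split_ifs
  · rfl
  · rfl
  · exact pvKey _
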